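-- pv_equiv track=rewrite | github.com/doanane/DSA_Problem_Solving | distribution-centers.py | solution
-- ===== SOURCE A (Python) =====
-- def solution(centerCapacities, dailyLog):
--     # Step 1: Setup
--     n = len(centerCapacities)
--     current_capacity = centerCapacities.copy()  # Track remaining capacity
--     total_processed = [0] * n  # Track packages processed per center
--     is_open = [True] * n  # Track which centers are open
--
--     # Step 2: Process log
--     current_center = 0  # Start at first center
--
--     for entry in dailyLog:
--         if entry.startswith("CLOSURE"):
--             # Parse which center closes
--             center_idx = int(entry.split()[1])
--             is_open[center_idx] = False
--             current_capacity[center_idx] = 0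
--         else:  # "PACKAGE"
--             # Find next open center with capacity
--             attempts = 0
--             while attempts < n:
--                 if is_open[current_center] and current_capacity[current_center] > 0:
--                     # This center can take the package
--                     current_capacity[current_center] -= 1
--                     total_processed[current_center] += 1
--
--                     # Check if we need to reset all centers
--                     all_at_zero = True
--                     for i in range(n):
--                         if is_open[i] and current_capacity[i] > 0:
--                             all_at_zero = False
--                             break
--
--                     if all_at_zero:
--                         # Reset all open centers
--                         for i in range(n):
--                             if is_open[i]:
--                                 current_capacity[i] = centerCapacities[i]
--
--                     break  # Package processed, move to next log entry
--
--                 # Move to next center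
--                 current_center = (current_center + 1) % n
--                 attempts += 1
--
--     # Step 3: Find center with max packages
--     max_packages = -1
--     max_index = -1
--
--     for i in range(n):
--         if total_processed[i] > max_packages or (total_processed[i] == max_packages and i > max_index):
--             max_packages = total_processed[i]
--             max_index = i
--
--     return max_index
-- ===== SOURCE B (Python) =====
-- def solution(centerCapacities, dailyLog):
--     # Batched queue distribution: runs of consecutive PACKAGE entries are served
--     # chunk-wise from an ordered queue of available centers (no per-package
--     # round-robin pointer scan).
--     n = len(centerCapacities)
--     is_open = [True] * n
--     processed = [0] * n
--     queue = [(i, centerCapacities[i]) for i in range(n) if centerCapacities[i] > 0]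
--     i = 0
--     L = len(dailyLog)
--     while i < L:
--         if dailyLog[i].startswith("CLOSURE"):
--             idx = int(dailyLog[i].split()[1]) % n
--             is_open[idx] = False
--             queue = [cell for cell in queue if cell[0] != idx]
--             i += 1
--         else:
--             k = 0
--             while i < L and not dailyLog[i].startswith("CLOSURE"):
--                 k += 1
--                 i += 1
--             while k > 0 and queue:
--                 idx, rem = queue[0]
--                 t = min(k, rem)
--                 processed[idx] += t
--                 k -= t
--                 if t == rem:
--                     queue.pop(0)
--                     if not queue:
--                         order = list(range(idx, n)) + list(range(idx))
--                         queue = [(j, centerCapacities[j]) for j in order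
--                                  if is_open[j] and centerCapacities[j] > 0]
--                 else:
--                     queue[0] = (idx, rem - t)
--     best = -1
--     for j in range(n):
--         if best < 0 or processed[j] >= processed[best]:
--             best = j
--     return best
-- ===== Notes on version B (the rewrite author's own statement) =====
-- stated objective: faster
-- what changed: B groups the log into runs of consecutive package entries and serves each run chunk-wise from an ordered queue of available (index, remaining) centers - serving min(k, remaining) packages at once, popping exhausted centers and rebuilding the queue cyclically on a reset - so there is no per-package loop, no round-robin pointer and no per-package scan of all centers; the busiest center is picked by a last-argmax scan.
import Mathlib
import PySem

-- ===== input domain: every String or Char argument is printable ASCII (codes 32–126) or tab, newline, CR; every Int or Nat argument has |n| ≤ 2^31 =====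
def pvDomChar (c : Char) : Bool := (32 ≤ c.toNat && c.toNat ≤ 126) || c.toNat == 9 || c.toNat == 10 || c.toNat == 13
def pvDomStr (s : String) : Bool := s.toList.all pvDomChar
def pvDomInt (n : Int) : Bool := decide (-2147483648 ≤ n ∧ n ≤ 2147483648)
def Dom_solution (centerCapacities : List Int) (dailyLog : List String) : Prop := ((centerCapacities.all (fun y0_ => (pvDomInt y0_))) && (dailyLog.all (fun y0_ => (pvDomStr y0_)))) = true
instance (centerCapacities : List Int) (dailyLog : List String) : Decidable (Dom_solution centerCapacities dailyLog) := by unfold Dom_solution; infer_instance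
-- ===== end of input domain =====

-- B replaces A's per-package round-robin pointer scan by run-batched, chunk-wise
-- serving from an ordered queue of available centers; same return value on Pre_.

-- ===== PORT A =====
-- Python's `lst[i] = v` (negative i counts from the end; out of range only outside
-- Pre_, where List.set is a no-op)
def pvWrap (len : Nat) (i : Int) : Nat := if i < 0 then ((len : Int) + i).toNat else i.toNat
def pvSetAt {α : Type} (xs : List α) (i : Int) (v : α) : List α := xs.set (pvWrap xs.length i) v
-- int(entry.split()[1]) (defaults only fire outside Pre_, where Python raises)
def closureIdx (entry : String) : Int := (PySem.Int.ofStr? ((PySem.Str.split₀ entry).getD 1 "")).getD 0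
-- the test `is_open[i] and current_capacity[i] > 0`
def goodC (isOpen : List Bool) (cap : List Int) (i : Nat) : Bool := isOpen.getD i false && decide (0 < cap.getD i 0)
-- A's all_at_zero scan (found-flag loop with break)
def allAtZero (isOpen : List Bool) (cap : List Int) (n : Nat) : Bool := !((List.range n).any (goodC isOpen cap))
-- A's reset loop
def resetOpen (orig : List Int) (isOpen : List Bool) (cap : List Int) (n : Nat) : List Int :=
  (List.range n).foldl (fun c i => if isOpen.getD i false then c.set i (orig.getD i 0) else c) cap
-- A's `while attempts < n` search-and-place loop; fuel = n - attempts
def placeLoopA (orig : List Int) (isOpen : List Bool) (n : Nat) :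
    Nat → List Int → List Int → Nat → List Int × List Int × Nat
  | 0, cap, total, cur => (cap, total, cur)
  | f+1, cap, total, cur =>
    if goodC isOpen cap cur then
      let cap1 := cap.set cur (cap.getD cur 0 - 1)
      let total1 := total.set cur (total.getD cur 0 + 1)
      (if allAtZero isOpen cap1 n then resetOpen orig isOpen cap1 n else cap1, total1, cur)
    else placeLoopA orig isOpen n f cap total ((cur + 1) % n)

def stepA (orig : List Int) (n : Nat) (st : List Int × List Int × List Bool × Nat) (entry : String) :
    List Int × List Int × List Bool × Nat :=
  if PySem.Str.startswith entry "CLOSURE" then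
    (pvSetAt st.1 (closureIdx entry) 0, st.2.1, pvSetAt st.2.2.1 (closureIdx entry) false, st.2.2.2)
  else
    let r := placeLoopA orig st.2.2.1 n n st.1 st.2.1 st.2.2.2
    (r.1, r.2.1, st.2.2.1, r.2.2)

-- A's final max scan with running (max_packages, max_index)
def finalA (total : List Int) (n : Nat) : Int :=
  ((List.range n).foldl
    (fun m i => if total.getD i 0 > m.1 ∨ (total.getD i 0 = m.1 ∧ (i : Int) > m.2)
                then (total.getD i 0, (i : Int)) else m)
    ((-1 : Int), (-1 : Int))).2

def solution (centerCapacities : List Int) (dailyLog : List String) : Int :=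
  let n := centerCapacities.length
  let r := dailyLog.foldl (stepA centerCapacities n)
    (centerCapacities, List.replicate n 0, List.replicate n true, 0)
  finalA r.2.1 n

-- ===== PORT B =====
-- the rebuilt queue `[(j, cc[j]) for j in range(idx,n)+range(idx) if is_open[j] and cc[j] > 0]`
def rebuildB (orig : List Int) (isOpen : List Bool) (n idx : Nat) : List (Nat × Int) :=
  (List.range' idx (n - idx) ++ List.range idx).filterMap
    (fun j => if isOpen.getD j false && decide (0 < orig.getD j 0) then some (j, orig.getD j 0) else none)

-- Source B's `while k > 0 and queue:` chunk loop; fuel = k bounds the loop (each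
-- iteration serves t ≥ 1 packages since queue entries keep rem > 0)
def serveRunB (orig : List Int) (isOpen : List Bool) (n : Nat) :
    Nat → Nat → List (Nat × Int) → List Int → List (Nat × Int) × List Int
  | _, 0, q, proc => (q, proc)
  | _, _+1, [], proc => ([], proc)
  | 0, _+1, q, proc => (q, proc)
  | f+1, k+1, (idx, rem) :: qt, proc =>
    let t : Int := min ((k+1 : Nat) : Int) rem
    let proc1 := proc.set idx (proc.getD idx 0 + t)
    let k1 := (((k+1 : Nat) : Int) - t).toNat
    if t = rem then
      serveRunB orig isOpen n f k1 (if qt.isEmpty then rebuildB orig isOpen n idx else qt) proc1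
    else
      serveRunB orig isOpen n f k1 ((idx, rem - t) :: qt) proc1

-- Source B's outer `while i < L` loop: one CLOSURE entry, or a whole run of
-- consecutive non-CLOSURE entries at once
def goB (orig : List Int) (n : Nat) :
    List String → List Bool → List (Nat × Int) → List Int → List Int
  | [], _, _, proc => proc
  | e :: rest, isOpen, q, proc =>
    if PySem.Str.startswith e "CLOSURE" then
      let idx := (PySem.Int.mod (closureIdx e) (n : Int)).toNat
      goB orig n rest (isOpen.set idx false) (q.filter (fun cell => decide (cell.1 ≠ idx))) proc
    else
      let k := (rest.takeWhile (fun s => !PySem.Str.startswith s "CLOSURE")).length + 1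
      let r := serveRunB orig isOpen n k k q proc
      goB orig n (rest.dropWhile (fun s => !PySem.Str.startswith s "CLOSURE")) isOpen r.1 r.2
  termination_by log => log.length
  decreasing_by
  · exact Nat.lt_succ_of_le (Nat.le_refl _)
  · exact Nat.lt_succ_of_le (List.dropWhile_sublist (l := rest) (p := fun s => !PySem.Str.startswith s "CLOSURE")).length_le

-- Source B's final `best` scan (last argmax, -1 on empty)
def finalBscan (proc : List Int) (n : Nat) : Int :=
  (List.range n).foldl
    (fun best j => if best < 0 ∨ proc.getD best.toNat 0 ≤ proc.getD j 0 then (j : Int) else best)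
    (-1)

def solution_alt (centerCapacities : List Int) (dailyLog : List String) : Int :=
  let n := centerCapacities.length
  let q0 := (List.range n).filterMap
    (fun i => if decide (0 < centerCapacities.getD i 0) then some (i, centerCapacities.getD i 0) else none)
  finalBscan (goB centerCapacities n dailyLog (List.replicate n true) q0 (List.replicate n 0)) n

-- ===== PRECONDITION & SPEC =====
-- Pre_ excludes exactly the log entries on which A raises: a "CLOSURE" entry with fewer
-- than two whitespace-separated tokens (IndexError), a second token int() rejects
-- (ValueError), or a parsed index outside -n..n-1 (IndexError).
def Pre_solution (centerCapacities : List Int) (dailyLog : List String) : Prop :=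
  ∀ entry ∈ dailyLog, PySem.Str.startswith entry "CLOSURE" = true →
    2 ≤ (PySem.Str.split₀ entry).length ∧
    PySem.Int.ofStr? ((PySem.Str.split₀ entry).getD 1 "") ≠ none ∧
    -(centerCapacities.length : Int) ≤ closureIdx entry ∧
    closureIdx entry < (centerCapacities.length : Int)
instance (centerCapacities : List Int) (dailyLog : List String) : Decidable (Pre_solution centerCapacities dailyLog) := by
  unfold Pre_solution; infer_instance

def pvWitness_solution : List Int × List String := ([2, 1], ["PACKAGE", "CLOSURE 0", "PACKAGE", "PACKAGE"])

def Spec_solution (centerCapacities : List Int) (dailyLog : List String) (out : Int) : Prop := out = solution_alt centerCapacities dailyLog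
instance (centerCapacities : List Int) (dailyLog : List String) (out : Int) : Decidable (Spec_solution centerCapacities dailyLog out) := by unfold Spec_solution; infer_instance

-- ===== CLAIM (what is proved, stated in full; the proofs are below) =====
def Claim_equal_solution : Prop := ∀ (centerCapacities : List Int) (dailyLog : List String), Dom_solution centerCapacities dailyLog → Pre_solution centerCapacities dailyLog → Spec_solution centerCapacities dailyLog (solution centerCapacities dailyLog)

-- ===== LEMMAS AND PROOFS =====

-- proof-side abstraction: the cyclic index order starting at cur, and the queue of
-- available centers it induces
def rotL (n cur : Nat) : List Nat := List.range' cur (n - cur) ++ List.range cur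
def gAv (o : List Bool) (cap : List Int) (j : Nat) : Option (Nat × Int) :=
  if goodC o cap j then some (j, cap.getD j 0) else none
def availFrom (o : List Bool) (cap : List Int) (n cur : Nat) : List (Nat × Int) :=
  (rotL n cur).filterMap (gAv o cap)
-- A's package step (stepA on a non-CLOSURE entry)
def packStep (orig : List Int) (n : Nat) (st : List Int × List Int × List Bool × Nat) :
    List Int × List Int × List Bool × Nat :=
  let r := placeLoopA orig st.2.2.1 n n st.1 st.2.1 st.2.2.2
  (r.1, r.2.1, st.2.2.1, r.2.2)
-- proof-side description of where A's scanning loop lands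
def findAvailB (isOpen : List Bool) (rem : List Int) (n : Nat) : Nat → Nat → Nat
  | 0, cur => cur
  | f+1, cur => if goodC isOpen rem cur then cur else findAvailB isOpen rem n f ((cur + 1) % n)
-- proof-side name for A's final fold
def pvFoldA (total : List Int) (n : Nat) : Int × Int :=
  (List.range n).foldl
    (fun m i => if total.getD i 0 > m.1 ∨ (total.getD i 0 = m.1 ∧ (i : Int) > m.2)
                then (total.getD i 0, (i : Int)) else m)
    ((-1 : Int), (-1 : Int))


-- ---- small getD/set facts ----
theorem pvGetD_set_self {α : Type} (xs : List α) (i : Nat) (v d : α) (h : i < xs.length) :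
    (xs.set i v).getD i d = v := by simp [List.getD, h]

theorem pvGetD_set_ne {α : Type} (xs : List α) (i j : Nat) (v d : α) (h : i ≠ j) :
    (xs.set i v).getD j d = xs.getD j d := by simp [List.getD, h]

theorem pvGetD_nonneg (xs : List Int) (i : Nat) (h : ∀ x ∈ xs, 0 ≤ x) : 0 ≤ xs.getD i 0 := by
  by_cases hi : i < xs.length
  · simpa [List.getD, hi] using h xs[i] (xs.getElem_mem hi)
  · have hn : xs[i]? = none := List.getElem?_eq_none (by omega)
    simp [List.getD, hn]

theorem pvMem_set_nonneg (xs : List Int) (c : Nat) (v : Int) (hv : 0 ≤ v)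
    (h : ∀ x ∈ xs, 0 ≤ x) : ∀ x ∈ xs.set c v, 0 ≤ x := by
  intro x hx
  rcases List.mem_or_eq_of_mem_set hx with hx' | rfl
  · exact h x hx'
  · exact hv

theorem resetOpen_length (orig : List Int) (o : List Bool) (cap : List Int) (n : Nat) :
    (resetOpen orig o cap n).length = cap.length := by
  unfold resetOpen
  generalize List.range n = l
  induction l generalizing cap with
  | nil => rfl
  | cons a t ih =>
    simp only [List.foldl_cons]
    split
    · rw [ih, List.length_set]
    · exact ih cap

-- ---- rotation-list facts ----
theorem rotL_cons (n cur : Nat) (h : cur < n) :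
    rotL n cur = cur :: (List.range' (cur+1) (n - cur - 1) ++ List.range cur) := by
  unfold rotL
  rw [show n - cur = (n - cur - 1) + 1 by omega, List.range'_succ]
  rfl

theorem rotL_shift (n cur : Nat) (h : cur < n) :
    rotL n ((cur + 1) % n) = (List.range' (cur+1) (n - cur - 1) ++ List.range cur) ++ [cur] := by
  by_cases h1 : cur + 1 < n
  · rw [show (cur + 1) % n = cur + 1 from Nat.mod_eq_of_lt h1]
    unfold rotL
    rw [List.range_succ, show n - (cur+1) = n - cur - 1 by omega, List.append_assoc]
  · have hn : cur + 1 = n := by omega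
    rw [show (cur + 1) % n = 0 by rw [hn]; exact Nat.mod_self n]
    unfold rotL
    rw [show n - cur - 1 = 0 by omega]
    simp only [List.range'_zero, List.nil_append, List.range_zero, List.append_nil, Nat.sub_zero]
    rw [← List.range_succ, show cur.succ = n from hn, List.range_eq_range']

theorem mem_rotL (n cur j : Nat) (h : cur ≤ n) : j ∈ rotL n cur ↔ j < n := by
  unfold rotL
  simp only [List.mem_append, List.mem_range'_1, List.mem_range]
  omega

-- ---- availFrom facts ----
theorem availFrom_shift (o : List Bool) (cap : List Int) (n cur : Nat) (h : cur < n)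
    (hbad : goodC o cap cur = false) :
    availFrom o cap n ((cur + 1) % n) = availFrom o cap n cur := by
  unfold availFrom
  rw [rotL_shift n cur h, rotL_cons n cur h, List.filterMap_append, List.filterMap_cons]
  have hg : gAv o cap cur = none := by simp [gAv, hbad]
  simp [hg]

theorem availFrom_good_cons (o : List Bool) (cap : List Int) (n cur : Nat) (h : cur < n)
    (hg : goodC o cap cur = true) :
    availFrom o cap n cur
      = (cur, cap.getD cur 0) :: (List.range' (cur+1) (n - cur - 1) ++ List.range cur).filterMap (gAv o cap) := by
  unfold availFrom
  rw [rotL_cons n cur h, List.filterMap_cons]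
  simp [gAv, hg]

theorem not_mem_rot_tail (n cur : Nat) :
    cur ∉ List.range' (cur+1) (n - cur - 1) ++ List.range cur := by
  simp only [List.mem_append, List.mem_range'_1, List.mem_range]
  omega

theorem avail_empty_iff (o : List Bool) (cap : List Int) (n cur : Nat) (h : cur ≤ n) :
    availFrom o cap n cur = [] ↔ allAtZero o cap n = true := by
  unfold availFrom allAtZero
  rw [List.filterMap_eq_nil_iff]
  simp only [Bool.not_eq_eq_eq_not, Bool.not_true, List.any_eq_false]
  constructor
  · intro hh i hi
    have := hh i ((mem_rotL n cur i h).mpr (List.mem_range.mp hi))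
    by_cases hg : goodC o cap i = true
    · simp [gAv, hg] at this
    · simpa using hg
  · intro hh j hj
    have hjn : j < n := (mem_rotL n cur j h).mp hj
    simp [gAv, hh j (List.mem_range.mpr hjn)]

theorem filterMap_gAv_set (o : List Bool) (cap : List Int) (c : Nat) (v : Int) :
    ∀ l : List Nat, c ∉ l → l.filterMap (gAv o (cap.set c v)) = l.filterMap (gAv o cap) := by
  intro l hl
  induction l with
  | nil => rfl
  | cons a t ih =>
    have ha : a ≠ c := by rintro rfl; exact hl (by simp)
    have ht : c ∉ t := fun h => hl (by simp [h])
    rw [List.filterMap_cons, List.filterMap_cons, ih ht]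
    have : gAv o (cap.set c v) a = gAv o cap a := by
      unfold gAv goodC
      rw [pvGetD_set_ne cap c a v 0 (Ne.symm ha)]
    rw [this]

-- the closure update: filtering a queue = availFrom of the closed state
theorem gAv_cases (o : List Bool) (cap : List Int) (a : Nat) :
    gAv o cap a = none ∨ gAv o cap a = some (a, cap.getD a 0) := by
  unfold gAv
  by_cases h : goodC o cap a = true
  · right; rw [if_pos h]
  · left; rw [if_neg h]

theorem filterMap_closure (o : List Bool) (cap : List Int) (j : Nat) :
    ∀ l : List Nat,
      (l.filterMap (gAv o cap)).filter (fun cell => decide (cell.1 ≠ j))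
        = l.filterMap (gAv (o.set j false) (cap.set j 0)) := by
  intro l
  induction l with
  | nil => rfl
  | cons a t ih =>
    by_cases ha : a = j
    · subst ha
      have h1 : gAv (o.set a false) (cap.set a 0) a = none := by
        unfold gAv goodC
        have hgd : (o.set a false).getD a false = false := by
          by_cases hl : a < o.length
          · simp [List.getD, hl]
          · have hn : (o.set a false)[a]? = none := List.getElem?_eq_none (by simp; omega)
            simp [List.getD, hn]
        rw [hgd]
        simp
      rw [List.filterMap_cons, List.filterMap_cons, h1]
      rcases gAv_cases o cap a with h2 | h2 <;> rw [h2]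
      · exact ih
      · rw [List.filter_cons, if_neg (by simp)]
        exact ih
    · have h1 : gAv (o.set j false) (cap.set j 0) a = gAv o cap a := by
        unfold gAv goodC
        rw [pvGetD_set_ne cap j a 0 0 (fun h => ha h.symm),
            pvGetD_set_ne o j a false false (fun h => ha h.symm)]
      rw [List.filterMap_cons, List.filterMap_cons, h1]
      rcases gAv_cases o cap a with h2 | h2 <;> rw [h2]
      · exact ih
      · rw [List.filter_cons, if_pos (by simp [ha])]
        rw [ih]

-- ---- resetOpen pointwise value, and availFrom of a reset state ----
theorem foldl_set_getD (orig : List Int) (o : List Bool) (j : Nat) :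
    ∀ (l : List Nat) (cap : List Int), j < cap.length →
      ((l.foldl (fun c i => if o.getD i false then c.set i (orig.getD i 0) else c) cap).getD j 0)
        = if j ∈ l ∧ o.getD j false = true then orig.getD j 0 else cap.getD j 0 := by
  intro l
  induction l with
  | nil => intro cap h; simp
  | cons a t ih =>
    intro cap h
    simp only [List.foldl_cons]
    by_cases ho : o.getD a false = true
    · rw [if_pos ho, ih (cap.set a (orig.getD a 0)) (by rw [List.length_set]; exact h)]
      by_cases hj : j = a
      · subst hj
        rw [pvGetD_set_self cap j (orig.getD j 0) 0 h, ite_self,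
          if_pos (⟨by simp, ho⟩ : j ∈ j :: t ∧ o.getD j false = true)]
      · rw [pvGetD_set_ne cap a j _ 0 (fun h' => hj h'.symm)]
        by_cases hm : j ∈ t
        · simp [hm, hj]
        · simp [hm, hj]
    · have ho' : o.getD a false = false := by simpa using ho
      rw [ho']
      simp only [Bool.false_eq_true, if_false]
      rw [ih cap h]
      by_cases hj : j = a
      · subst hj
        simp only [ho', List.mem_cons]
        by_cases hm : j ∈ t
        · simp [hm]
        · simp [hm]
      · by_cases hm : j ∈ t
        · simp [hm]
        · simp [hm, hj]

theorem resetOpen_getD (orig : List Int) (o : List Bool) (cap : List Int) (n j : Nat)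
    (hj : j < n) (hc : cap.length = n) :
    (resetOpen orig o cap n).getD j 0
      = if o.getD j false = true then orig.getD j 0 else cap.getD j 0 := by
  unfold resetOpen
  rw [foldl_set_getD orig o j (List.range n) cap (by omega)]
  simp [List.mem_range.mpr hj]

theorem reset_avail (orig : List Int) (o : List Bool) (cap : List Int) (n c : Nat)
    (hc : cap.length = n) (hcn : c ≤ n) :
    availFrom o (resetOpen orig o cap n) n c = rebuildB orig o n c := by
  unfold availFrom rebuildB rotL
  apply List.filterMap_congr
  intro j hj
  have hjn : j < n := (mem_rotL n c j hcn).mp (by exact hj)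
  unfold gAv goodC
  rw [resetOpen_getD orig o cap n j hjn hc]
  by_cases ho : o.getD j false = true
  · rw [ho]; simp
  · have ho' : o.getD j false = false := by simpa using ho
    rw [ho']; simp


-- ---- A's scanning loop ----
theorem pvWrap_lt (n : Nat) (i : Int) (h1 : -(n : Int) ≤ i) (h2 : i < (n : Int)) :
    pvWrap n i < n := by
  unfold pvWrap; split <;> omega

theorem placeLoopA_none (orig : List Int) (o : List Bool) (n : Nat)
    (cap total : List Int) (h0 : ∀ i < n, goodC o cap i = false) :
    ∀ f cur, cur < n →
      placeLoopA orig o n f cap total cur = (cap, total, (cur + f) % n) := by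
  intro f
  induction f with
  | zero => intro cur hcur; simp [placeLoopA, Nat.mod_eq_of_lt hcur]
  | succ f ih =>
    intro cur hcur
    rw [placeLoopA, h0 cur hcur]
    simp only [Bool.false_eq_true, if_false]
    rw [ih ((cur + 1) % n) (Nat.mod_lt _ (by omega))]
    rw [Nat.mod_add_mod, show cur + 1 + f = cur + (f + 1) by omega]

theorem placeLoopA_found (orig : List Int) (o : List Bool) (n : Nat)
    (cap total : List Int) :
    ∀ f cur, cur < n → (∃ k, k < f ∧ goodC o cap ((cur + k) % n) = true) →
      findAvailB o cap n f cur < n ∧ goodC o cap (findAvailB o cap n f cur) = true ∧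
      placeLoopA orig o n f cap total cur =
        ((if allAtZero o (cap.set (findAvailB o cap n f cur) (cap.getD (findAvailB o cap n f cur) 0 - 1)) n
          then resetOpen orig o (cap.set (findAvailB o cap n f cur) (cap.getD (findAvailB o cap n f cur) 0 - 1)) n
          else cap.set (findAvailB o cap n f cur) (cap.getD (findAvailB o cap n f cur) 0 - 1)),
         total.set (findAvailB o cap n f cur) (total.getD (findAvailB o cap n f cur) 0 + 1),
         findAvailB o cap n f cur) := by
  intro f
  induction f with
  | zero => intro cur hcur hex; omega
  | succ f ih =>
    intro cur hcur hex
    by_cases hg : goodC o cap cur = true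
    · refine ⟨by simpa [findAvailB, hg] using hcur, by simpa [findAvailB, hg] using hg, ?_⟩
      rw [placeLoopA, if_pos hg]
      simp [findAvailB, hg]
    · have hg' : goodC o cap cur = false := by simpa using hg
      obtain ⟨k, hk, hgood⟩ := hex
      have hk0 : k ≠ 0 := by
        rintro rfl
        rw [Nat.add_zero, Nat.mod_eq_of_lt hcur] at hgood
        exact hg hgood
      have hex' : ∃ k', k' < f ∧ goodC o cap (((cur + 1) % n + k') % n) = true := by
        refine ⟨k - 1, by omega, ?_⟩
        rw [Nat.mod_add_mod, show cur + 1 + (k - 1) = cur + k by omega]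
        exact hgood
      have := ih ((cur + 1) % n) (Nat.mod_lt _ (by omega)) hex'
      rw [placeLoopA, if_neg (by simp [hg'])]
      simpa [findAvailB, hg'] using this

-- scanning does not change the queue abstraction, and lands on a good center
theorem findAvailB_avail (o : List Bool) (cap : List Int) (n : Nat) :
    ∀ f cur, cur < n → (∃ k, k < f ∧ goodC o cap ((cur + k) % n) = true) →
      findAvailB o cap n f cur < n ∧ goodC o cap (findAvailB o cap n f cur) = true ∧
      availFrom o cap n (findAvailB o cap n f cur) = availFrom o cap n cur := by
  intro f
  induction f with
  | zero => intro cur hcur hex; omega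
  | succ f ih =>
    intro cur hcur hex
    by_cases hg : goodC o cap cur = true
    · refine ⟨by simpa [findAvailB, hg] using hcur, by simpa [findAvailB, hg] using hg, ?_⟩
      simp [findAvailB, hg]
    · have hg' : goodC o cap cur = false := by simpa using hg
      obtain ⟨k, hk, hgood⟩ := hex
      have hk0 : k ≠ 0 := by
        rintro rfl
        rw [Nat.add_zero, Nat.mod_eq_of_lt hcur] at hgood
        exact hg hgood
      have hex' : ∃ k', k' < f ∧ goodC o cap (((cur + 1) % n + k') % n) = true := by
        refine ⟨k - 1, by omega, ?_⟩
        rw [Nat.mod_add_mod, show cur + 1 + (k - 1) = cur + k by omega]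
        exact hgood
      have h3 := ih ((cur + 1) % n) (Nat.mod_lt _ (by omega)) hex'
      rw [availFrom_shift o cap n cur hcur hg'] at h3
      rw [findAvailB, if_neg (by simp [hg'])]
      exact h3

theorem exists_offset (o : List Bool) (cap : List Int) (n cur j : Nat)
    (hcur : cur < n) (hj : j < n) (hg : goodC o cap j = true) :
    ∃ k, k < n ∧ goodC o cap ((cur + k) % n) = true := by
  by_cases hle : cur ≤ j
  · exact ⟨j - cur, by omega,
      by rw [show cur + (j - cur) = j by omega, Nat.mod_eq_of_lt hj]; exact hg⟩
  · refine ⟨j + n - cur, by omega, ?_⟩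
    rw [show cur + (j + n - cur) = j + n by omega, Nat.add_mod_right, Nat.mod_eq_of_lt hj]
    exact hg

theorem avail_nonempty_offset (o : List Bool) (cap : List Int) (n cur : Nat) (c : Nat) (rem : Int)
    (qt : List (Nat × Int)) (hcur : cur < n)
    (hq : availFrom o cap n cur = (c, rem) :: qt) :
    ∃ k, k < n ∧ goodC o cap ((cur + k) % n) = true := by
  have hne : ∃ j ∈ rotL n cur, gAv o cap j ≠ none := by
    by_contra hco
    push Not at hco
    have h0 : availFrom o cap n cur = [] := by
      unfold availFrom
      exact List.filterMap_eq_nil_iff.mpr (by intro a ha; exact hco a ha)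
    rw [hq] at h0
    exact List.cons_ne_nil _ _ h0
  obtain ⟨j, hjm, hjg⟩ := hne
  have hjn : j < n := (mem_rotL n cur j (by omega)).mp hjm
  have hjgood : goodC o cap j = true := by
    by_contra hgg
    exact hjg (by unfold gAv; rw [if_neg hgg])
  exact exists_offset o cap n cur j hcur hjn hjgood

-- head of the queue abstraction = where A's scan lands
theorem avail_head (o : List Bool) (cap : List Int) (n cur : Nat) (c : Nat) (rem : Int)
    (qt : List (Nat × Int)) (hcur : cur < n)
    (hq : availFrom o cap n cur = (c, rem) :: qt) :
    findAvailB o cap n n cur = c ∧ c < n ∧ goodC o cap c = true ∧ rem = cap.getD c 0 ∧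
    qt = (List.range' (c+1) (n - c - 1) ++ List.range c).filterMap (gAv o cap) := by
  obtain ⟨hlt, hgood, heq⟩ :=
    findAvailB_avail o cap n n cur hcur (avail_nonempty_offset o cap n cur c rem qt hcur hq)
  rw [hq] at heq
  rw [availFrom_good_cons o cap n _ hlt hgood] at heq
  obtain ⟨h1, h2⟩ := List.cons_eq_cons.mp heq.symm
  obtain ⟨hc, hrem⟩ := Prod.mk.inj h1
  subst hc
  exact ⟨rfl, hlt, hgood, hrem, h2⟩

-- ---- one package step of A, described through the queue abstraction ----
theorem packStep_empty (orig : List Int) (n : Nat) (cap total : List Int) (o : List Bool)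
    (cur : Nat) (hcur : cur < n ∨ (n = 0 ∧ cur = 0))
    (hq : availFrom o cap n cur = []) :
    packStep orig n (cap, total, o, cur) = (cap, total, o, cur) := by
  unfold packStep
  rcases hcur with h | ⟨h0, hc0⟩
  · have haz := (avail_empty_iff o cap n cur (by omega)).mp hq
    have hall : ∀ i < n, goodC o cap i = false := by
      intro i hi
      have := haz
      unfold allAtZero at this
      simp only [Bool.not_eq_eq_eq_not, Bool.not_true, List.any_eq_false] at this
      have h2 := this i (List.mem_range.mpr hi)
      simpa using h2
    rw [placeLoopA_none orig o n cap total hall n cur h]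
    simp [Nat.add_mod_right, Nat.mod_eq_of_lt h]
  · subst h0; subst hc0; rfl

theorem packStep_step (orig : List Int) (n : Nat) (cap total : List Int) (o : List Bool)
    (cur c : Nat) (rem : Int) (qt : List (Nat × Int))
    (hcap : cap.length = n) (hcur : cur < n)
    (hq : availFrom o cap n cur = (c, rem) :: qt) :
    packStep orig n (cap, total, o, cur)
      = (if rem = 1 ∧ qt = [] then resetOpen orig o (cap.set c (rem - 1)) n else cap.set c (rem - 1),
         total.set c (total.getD c 0 + 1), o, c)
    ∧ availFrom o (if rem = 1 ∧ qt = [] then resetOpen orig o (cap.set c (rem - 1)) n else cap.set c (rem - 1)) n c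
        = (if rem = 1 then (if qt = [] then rebuildB orig o n c else qt) else (c, rem - 1) :: qt)
    ∧ c < n ∧ 1 ≤ rem ∧ rem = cap.getD c 0 := by
  obtain ⟨hfind, hc, hgood, hrem, hqt⟩ := avail_head o cap n cur c rem qt hcur hq
  obtain ⟨_, _, hplace⟩ := placeLoopA_found orig o n cap total n cur hcur
    (avail_nonempty_offset o cap n cur c rem qt hcur hq)
  rw [hfind] at hplace
  have hopos : o.getD c false = true ∧ 0 < cap.getD c 0 := by
    have hg := hgood; unfold goodC at hg
    simpa using hg
  have hrem1 : 1 ≤ rem := by rw [hrem]; omega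
  have hcc : cap.set c (cap.getD c 0 - 1) = cap.set c (rem - 1) := by rw [hrem]
  rw [hcc] at hplace
  have htail : (List.range' (c+1) (n - c - 1) ++ List.range c).filterMap (gAv o (cap.set c (rem - 1)))
      = qt := by
    rw [filterMap_gAv_set o cap c (rem - 1) _ (not_mem_rot_tail n c), ← hqt]
  have hgd1 : (cap.set c (rem - 1)).getD c 0 = rem - 1 :=
    pvGetD_set_self cap c (rem - 1) 0 (by omega)
  have havail1 : availFrom o (cap.set c (rem - 1)) n c
      = if 0 < rem - 1 then (c, rem - 1) :: qt else qt := by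
    by_cases hpos : 0 < rem - 1
    · rw [if_pos hpos]
      have hg1 : goodC o (cap.set c (rem - 1)) c = true := by
        unfold goodC; rw [hgd1, hopos.1]; simp; omega
      rw [availFrom_good_cons o _ n c hc hg1, htail, hgd1]
    · rw [if_neg hpos]
      have hg1 : gAv o (cap.set c (rem - 1)) c = none := by
        unfold gAv goodC; rw [hgd1]
        rw [if_neg (by simp; omega)]
      unfold availFrom
      rw [rotL_cons n c hc, List.filterMap_cons_none hg1, htail]
  have hAZ : allAtZero o (cap.set c (rem - 1)) n = true ↔ (rem = 1 ∧ qt = []) := by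
    rw [← avail_empty_iff o _ n c (by omega), havail1]
    by_cases hpos : 0 < rem - 1
    · rw [if_pos hpos]
      constructor
      · intro h; exact absurd h (List.cons_ne_nil _ _)
      · rintro ⟨h1, _⟩; omega
    · rw [if_neg hpos]
      constructor
      · intro h; exact ⟨by omega, h⟩
      · rintro ⟨_, h⟩; exact h
  refine ⟨?_, ?_, hc, hrem1, hrem⟩
  · unfold packStep
    simp only
    rw [hplace]
    by_cases hcase : rem = 1 ∧ qt = []
    · rw [if_pos (hAZ.mpr hcase), if_pos hcase]
    · rw [if_neg (fun h => hcase (hAZ.mp h)), if_neg hcase]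
  · by_cases hcase : rem = 1 ∧ qt = []
    · rw [if_pos hcase, if_pos hcase.1, if_pos hcase.2]
      exact reset_avail orig o (cap.set c (rem - 1)) n c (by rw [List.length_set]; exact hcap) (by omega)
    · rw [if_neg hcase, havail1]
      by_cases hr1 : rem = 1
      · have hqt' : qt ≠ [] := fun h => hcase ⟨hr1, h⟩
        rw [if_pos hr1, if_neg hqt', if_neg (by omega)]
      · rw [if_neg hr1, if_pos (by omega)]

-- ---- a chunk of t consecutive package steps at the queue head ----
theorem chunk (orig : List Int) (n : Nat) :
    ∀ (t : Nat) (cap total : List Int) (o : List Bool) (cur c : Nat) (rem : Int) (qt : List (Nat × Int)),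
    cap.length = n → total.length = n → cur < n →
    availFrom o cap n cur = (c, rem) :: qt →
    1 ≤ t → (t : Int) ≤ rem →
    (packStep orig n)^[t] (cap, total, o, cur)
      = (if (t : Int) = rem ∧ qt = [] then resetOpen orig o (cap.set c (rem - t)) n else cap.set c (rem - t),
         total.set c (total.getD c 0 + t), o, c)
    ∧ availFrom o ((packStep orig n)^[t] (cap, total, o, cur)).1 n c
        = (if (t : Int) = rem then (if qt = [] then rebuildB orig o n c else qt) else (c, rem - t) :: qt)
    ∧ c < n := by
  intro t
  induction t with
  | zero => intro cap total o cur c rem qt _ _ _ _ h1 _; omega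
  | succ t ih =>
    intro cap total o cur c rem qt hcap htot hcur hq h1 hle
    obtain ⟨hstep, havail, hc, hrem1, hremv⟩ :=
      packStep_step orig n cap total o cur c rem qt hcap hcur hq
    by_cases ht0 : t = 0
    · subst ht0
      rw [Function.iterate_one]
      have e1 : (((0:Nat) + 1 : Nat) : Int) = 1 := by norm_num
      rw [e1]
      have econd2 : ((1:Int) = rem) = (rem = 1) := propext ⟨Eq.symm, Eq.symm⟩
      simp only [econd2]
      exact ⟨by rw [hstep], by rw [hstep]; exact havail, hc⟩
    · have ht1 : 1 ≤ t := by omega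
      have hrembig : (2:Int) ≤ rem := by
        have : (((t+1:Nat)) : Int) ≤ rem := hle
        push_cast at this
        omega
      have hne : ¬(rem = 1 ∧ qt = []) := by rintro ⟨hr1, _⟩; omega
      have hner : rem ≠ 1 := by omega
      have hstep' : packStep orig n (cap, total, o, cur)
          = (cap.set c (rem - 1), total.set c (total.getD c 0 + 1), o, c) := by
        rw [hstep, if_neg hne]
      have havail' : availFrom o (cap.set c (rem - 1)) n c = (c, rem - 1) :: qt := by
        rw [if_neg hne] at havail
        rw [if_neg hner] at havail
        exact havail
      have IH := ih (cap.set c (rem - 1)) (total.set c (total.getD c 0 + 1)) o c c (rem - 1) qt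
        (by rw [List.length_set]; exact hcap) (by rw [List.length_set]; exact htot) hc havail' ht1
        (by push_cast at hle ⊢; omega)
      obtain ⟨IH1, IH2, _⟩ := IH
      have hiter : (packStep orig n)^[t+1] (cap, total, o, cur)
          = (packStep orig n)^[t] (cap.set c (rem - 1), total.set c (total.getD c 0 + 1), o, c) := by
        rw [Function.iterate_succ_apply, hstep']
      have ecap : (cap.set c (rem - 1)).set c (rem - 1 - (t : Int))
          = cap.set c (rem - ((t+1 : Nat) : Int)) := by
        rw [List.set_set]; congr 1; push_cast; ring
      have etot : (total.set c (total.getD c 0 + 1)).set c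
            ((total.set c (total.getD c 0 + 1)).getD c 0 + (t : Int))
          = total.set c (total.getD c 0 + ((t+1 : Nat) : Int)) := by
        rw [pvGetD_set_self total c _ 0 (by omega), List.set_set]; congr 1; push_cast; ring
      have econd : ((t : Int) = rem - 1 ∧ qt = []) = (((t+1 : Nat) : Int) = rem ∧ qt = []) := by
        apply propext
        constructor <;> rintro ⟨h, h2⟩ <;> exact ⟨by push_cast at h ⊢; omega, h2⟩
      have econd2 : ((t : Int) = rem - 1) = (((t+1 : Nat) : Int) = rem) := by
        apply propext
        constructor <;> intro h <;> (push_cast at h ⊢; omega)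
      have evalue : rem - 1 - (t : Int) = rem - ((t+1 : Nat) : Int) := by push_cast; ring
      refine ⟨?_, ?_, hc⟩
      · rw [hiter, IH1, ecap, etot]
        simp only [econd]
      · rw [hiter, IH2, evalue]
        simp only [econd2]

-- ---- unfolding equations for the B-side loops ----
theorem serveRunB_zero (orig : List Int) (o : List Bool) (n fuel : Nat)
    (q : List (Nat × Int)) (proc : List Int) :
    serveRunB orig o n fuel 0 q proc = (q, proc) := by
  cases fuel <;> cases q <;> rfl

theorem serveRunB_nil (orig : List Int) (o : List Bool) (n f k : Nat) (proc : List Int) :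
    serveRunB orig o n (f+1) (k+1) [] proc = ([], proc) := rfl

theorem serveRunB_cons (orig : List Int) (o : List Bool) (n f k : Nat) (c : Nat) (rem : Int)
    (qt : List (Nat × Int)) (proc : List Int) :
    serveRunB orig o n (f+1) (k+1) ((c, rem) :: qt) proc =
      (if min ((k+1 : Nat) : Int) rem = rem then
        serveRunB orig o n f (((k+1 : Nat) : Int) - min ((k+1 : Nat) : Int) rem).toNat
          (if qt.isEmpty then rebuildB orig o n c else qt)
          (proc.set c (proc.getD c 0 + min ((k+1 : Nat) : Int) rem))
      else
        serveRunB orig o n f (((k+1 : Nat) : Int) - min ((k+1 : Nat) : Int) rem).toNat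
          ((c, rem - min ((k+1 : Nat) : Int) rem) :: qt)
          (proc.set c (proc.getD c 0 + min ((k+1 : Nat) : Int) rem))) := rfl

theorem goB_nil (orig : List Int) (n : Nat) (o : List Bool) (q : List (Nat × Int)) (proc : List Int) :
    goB orig n [] o q proc = proc := by
  rw [goB]

theorem goB_cons (orig : List Int) (n : Nat) (e : String) (rest : List String)
    (o : List Bool) (q : List (Nat × Int)) (proc : List Int) :
    goB orig n (e :: rest) o q proc =
      if PySem.Str.startswith e "CLOSURE" then
        goB orig n rest (o.set ((PySem.Int.mod (closureIdx e) (n : Int)).toNat) false)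
          (q.filter (fun cell => decide (cell.1 ≠ (PySem.Int.mod (closureIdx e) (n : Int)).toNat))) proc
      else
        goB orig n (rest.dropWhile (fun s => !PySem.Str.startswith s "CLOSURE")) o
          (serveRunB orig o n ((rest.takeWhile (fun s => !PySem.Str.startswith s "CLOSURE")).length + 1)
            ((rest.takeWhile (fun s => !PySem.Str.startswith s "CLOSURE")).length + 1) q proc).1
          (serveRunB orig o n ((rest.takeWhile (fun s => !PySem.Str.startswith s "CLOSURE")).length + 1)
            ((rest.takeWhile (fun s => !PySem.Str.startswith s "CLOSURE")).length + 1) q proc).2 := by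
  rw [goB]

-- ---- a whole run of packages, B's chunk loop vs iterated A package steps ----
theorem serve_sim (orig : List Int) (n : Nat) (o : List Bool) :
    ∀ (fuel k : Nat) (cap total : List Int) (cur : Nat) (q : List (Nat × Int)),
    k ≤ fuel → cap.length = n → total.length = n →
    (cur < n ∨ (n = 0 ∧ cur = 0)) → q = availFrom o cap n cur → (∀ x ∈ total, 0 ≤ x) →
    ∃ cap' total' cur',
      (packStep orig n)^[k] (cap, total, o, cur) = (cap', total', o, cur') ∧
      serveRunB orig o n fuel k q total = (availFrom o cap' n cur', total') ∧
      cap'.length = n ∧ total'.length = n ∧ (cur' < n ∨ (n = 0 ∧ cur' = 0)) ∧ (∀ x ∈ total', 0 ≤ x) := by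
  intro fuel
  induction fuel with
  | zero =>
    intro k cap total cur q hk hcap htot hcur hq hnn
    have hk0 : k = 0 := by omega
    subst hk0
    exact ⟨cap, total, cur, by simp, by rw [serveRunB_zero, hq], hcap, htot, hcur, hnn⟩
  | succ f ih =>
    intro k cap total cur q hk hcap htot hcur hq hnn
    cases k with
    | zero =>
      exact ⟨cap, total, cur, by simp, by rw [serveRunB_zero, hq], hcap, htot, hcur, hnn⟩
    | succ kk =>
      cases q with
      | nil =>
        have hfix := packStep_empty orig n cap total o cur hcur hq.symm
        refine ⟨cap, total, cur, Function.iterate_fixed hfix (kk+1), ?_, hcap, htot, hcur, hnn⟩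
        rw [serveRunB_nil, ← hq]
      | cons hd qt =>
        obtain ⟨c, rem⟩ := hd
        have hcur' : cur < n := by
          rcases hcur with h | ⟨h0, hc0⟩
          · exact h
          · exfalso
            subst h0; subst hc0
            exact List.cons_ne_nil _ _ hq
        obtain ⟨hfind, hc, hgood, hremv, hqt⟩ := avail_head o cap n cur c rem qt hcur' hq.symm
        have hrem1 : (1:Int) ≤ rem := by
          have hg := hgood
          unfold goodC at hg
          simp only [Bool.and_eq_true, decide_eq_true_eq] at hg
          rw [hremv]; omega
        set t : Int := min ((kk+1 : Nat) : Int) rem with htdef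
        have hkk1 : (1:Int) ≤ ((kk+1:Nat):Int) := by push_cast; omega
        have ht1 : (1:Int) ≤ t := le_min hkk1 hrem1
        have htk : t ≤ ((kk+1 : Nat) : Int) := min_le_left _ _
        have htr : t ≤ rem := min_le_right _ _
        set tN := t.toNat with htNdef
        have htNval : (tN : Int) = t := Int.toNat_of_nonneg (by omega)
        have htN1 : 1 ≤ tN := by omega
        have htNk : tN ≤ kk + 1 := by
          have h2 : (tN : Int) ≤ ((kk+1:Nat):Int) := by rw [htNval]; exact htk
          exact_mod_cast h2
        obtain ⟨hiter, havail, _⟩ := chunk orig n tN cap total o cur c rem qt hcap htot hcur'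
          hq.symm htN1 (by rw [htNval]; exact htr)
        rw [htNval] at hiter havail
        set capF := (if t = rem ∧ qt = [] then resetOpen orig o (cap.set c (rem - t)) n
          else cap.set c (rem - t)) with hcapF
        set totalF := total.set c (total.getD c 0 + t) with htotalF
        have hfst : ((packStep orig n)^[tN] (cap, total, o, cur)).1 = capF := by rw [hiter]
        rw [hfst] at havail
        have hcapFlen : capF.length = n := by
          rw [hcapF]; split
          · rw [resetOpen_length, List.length_set]; exact hcap
          · rw [List.length_set]; exact hcap
        have htotalFlen : totalF.length = n := by rw [htotalF, List.length_set]; exact htot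
        have hnnF : ∀ x ∈ totalF, 0 ≤ x := by
          rw [htotalF]
          exact pvMem_set_nonneg total c _ (by have := pvGetD_nonneg total c hnn; omega) hnn
        have hk1 : (((kk+1:Nat):Int) - t).toNat = kk + 1 - tN := by omega
        obtain ⟨cap2, total2, cur2, hiter2, hrun2, hl1, hl2, hcur2, hnn2⟩ :=
          ih (kk+1-tN) capF totalF c (availFrom o capF n c) (by omega) hcapFlen htotalFlen
            (Or.inl hc) rfl hnnF
        refine ⟨cap2, total2, cur2, ?_, ?_, hl1, hl2, hcur2, hnn2⟩
        · have hsplitA : (packStep orig n)^[kk+1] (cap, total, o, cur)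
              = (packStep orig n)^[kk+1-tN] ((packStep orig n)^[tN] (cap, total, o, cur)) := by
            rw [← Function.iterate_add_apply, Nat.sub_add_cancel htNk]
          rw [hsplitA, hiter, hiter2]
        · rw [serveRunB_cons, ← htdef, hk1, ← htotalF]
          by_cases hteq : t = rem
          · rw [if_pos hteq]
            have hqq : (if qt.isEmpty then rebuildB orig o n c else qt) = availFrom o capF n c := by
              rw [havail, if_pos hteq]
              by_cases hqt : qt = []
              · subst hqt; rfl
              · have he : qt.isEmpty = false := by
                  cases qt with
                  | nil => exact absurd rfl hqt
                  | cons a b => rfl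
                rw [he, if_neg hqt]
                simp
            rw [hqq]
            exact hrun2
          · rw [if_neg hteq]
            have hqq : ((c, rem - t) :: qt) = availFrom o capF n c := by
              rw [havail, if_neg hteq]
            rw [hqq]
            exact hrun2

-- ---- A's fold over a run of package entries ----
theorem foldl_pack (orig : List Int) (n : Nat) :
    ∀ (l : List String), (∀ s ∈ l, PySem.Str.startswith s "CLOSURE" = false) →
    ∀ st, l.foldl (stepA orig n) st = (packStep orig n)^[l.length] st := by
  intro l
  induction l with
  | nil => intro _ st; rfl
  | cons e tl iht =>
    intro hall st
    rw [List.foldl_cons, List.length_cons, Function.iterate_succ_apply]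
    have hstep : stepA orig n st e = packStep orig n st := by
      unfold stepA packStep
      rw [if_neg (by rw [hall e (by simp)]; simp)]
    rw [hstep, iht (fun s hs => hall s (by simp [hs]))]

-- ---- the whole log ----
theorem go_sim (orig : List Int) (n : Nat) :
    ∀ (N : Nat) (log : List String), log.length ≤ N →
    ∀ (cap total : List Int) (o : List Bool) (cur : Nat) (q : List (Nat × Int)),
    (∀ e ∈ log, PySem.Str.startswith e "CLOSURE" = true →
      -(n : Int) ≤ closureIdx e ∧ closureIdx e < (n : Int)) →
    cap.length = n → total.length = n → o.length = n →
    (cur < n ∨ (n = 0 ∧ cur = 0)) →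
    q = availFrom o cap n cur → (∀ x ∈ total, 0 ≤ x) →
    goB orig n log o q total = (log.foldl (stepA orig n) (cap, total, o, cur)).2.1 ∧
    (∀ x ∈ (log.foldl (stepA orig n) (cap, total, o, cur)).2.1, 0 ≤ x) := by
  intro N
  induction N with
  | zero =>
    intro log hlen cap total o cur q hpre hcap htot ho hcur hq hnn
    have hnil : log = [] := List.length_eq_zero_iff.mp (by omega)
    subst hnil
    exact ⟨by rw [goB_nil]; rfl, hnn⟩
  | succ N ihN =>
    intro log hlen cap total o cur q hpre hcap htot ho hcur hq hnn
    cases log with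
    | nil => exact ⟨by rw [goB_nil]; rfl, hnn⟩
    | cons e rest =>
      by_cases hs : PySem.Str.startswith e "CLOSURE" = true
      · obtain ⟨hlo, hhi⟩ := hpre e (by simp) hs
        have hn0 : 0 < n := by
          rcases Nat.eq_zero_or_pos n with h0 | h0
          · exfalso
            rw [h0] at hlo hhi
            simp at hlo hhi
            omega
          · exact h0
        have hjlt : pvWrap n (closureIdx e) < n := pvWrap_lt n _ hlo hhi
        have hmod : (PySem.Int.mod (closureIdx e) (n:Int)).toNat = pvWrap n (closureIdx e) := by
          rw [PySem.Int.mod_eq_emod_of_pos (by exact_mod_cast hn0)]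
          unfold pvWrap
          by_cases hv : closureIdx e < 0
          · rw [if_pos hv]
            have h3 : closureIdx e % (n:Int) = closureIdx e + n :=
              (Int.add_emod_right (closureIdx e) n).symm.trans
                (Int.emod_eq_of_lt (by omega) (by omega))
            rw [h3, Int.add_comm]
          · rw [if_neg hv]
            rw [Int.emod_eq_of_lt (by omega) hhi]
        have hstepA : stepA orig n (cap, total, o, cur) e
            = (cap.set (pvWrap n (closureIdx e)) 0, total, o.set (pvWrap n (closureIdx e)) false, cur) := by
          unfold stepA
          rw [if_pos hs]
          unfold pvSetAt
          rw [hcap, ho]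
        rw [List.foldl_cons, hstepA, goB_cons, if_pos hs, hmod]
        apply ihN rest (by simp at hlen; omega) (cap.set (pvWrap n (closureIdx e)) 0) total
          (o.set (pvWrap n (closureIdx e)) false) cur _
          (fun e' he' hsw => hpre e' (List.mem_cons_of_mem e he') hsw)
          (by rw [List.length_set]; exact hcap) htot (by rw [List.length_set]; exact ho) hcur ?_ hnn
        rw [hq]
        unfold availFrom
        exact filterMap_closure o cap (pvWrap n (closureIdx e)) (rotL n cur)
      · have hs' : PySem.Str.startswith e "CLOSURE" = false := by simpa using hs
        have hrun_nc : ∀ s ∈ e :: rest.takeWhile (fun s => !PySem.Str.startswith s "CLOSURE"),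
            PySem.Str.startswith s "CLOSURE" = false := by
          intro s hsm
          rcases List.mem_cons.mp hsm with rfl | hsm'
          · exact hs'
          · have h4 := List.mem_takeWhile_imp hsm'
            simpa using h4
        obtain ⟨cap', total', cur', hiter, hrun, hl1, hl2, hcur2, hnn2⟩ :=
          serve_sim orig n o ((rest.takeWhile (fun s => !PySem.Str.startswith s "CLOSURE")).length + 1)
            ((rest.takeWhile (fun s => !PySem.Str.startswith s "CLOSURE")).length + 1)
            cap total cur q le_rfl hcap htot hcur hq hnn
        have hsplit : e :: rest
            = (e :: rest.takeWhile (fun s => !PySem.Str.startswith s "CLOSURE"))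
              ++ rest.dropWhile (fun s => !PySem.Str.startswith s "CLOSURE") := by
          rw [List.cons_append, List.takeWhile_append_dropWhile]
        have hfold : (e :: rest).foldl (stepA orig n) (cap, total, o, cur)
            = (rest.dropWhile (fun s => !PySem.Str.startswith s "CLOSURE")).foldl (stepA orig n)
                (cap', total', o, cur') := by
          conv_lhs => rw [hsplit]
          rw [List.foldl_append, foldl_pack orig n _ hrun_nc, List.length_cons, hiter]
        rw [hfold, goB_cons, if_neg hs, hrun]
        exact ihN (rest.dropWhile (fun s => !PySem.Str.startswith s "CLOSURE"))
          (by
            have h5 := (List.dropWhile_sublist (l := rest)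
              (p := fun s => !PySem.Str.startswith s "CLOSURE")).length_le
            simp at hlen; omega)
          cap' total' o cur' _
          (fun e' he' hsw => hpre e'
            (List.mem_cons_of_mem e ((List.dropWhile_sublist _).subset he')) hsw)
          hl1 hl2 ho hcur2 rfl hnn2

-- ---- the two final scans agree on nonnegative counts ----
def pvFoldB (total : List Int) (n : Nat) : Int :=
  (List.range n).foldl
    (fun best j => if best < 0 ∨ total.getD best.toNat 0 ≤ total.getD j 0 then (j : Int) else best)
    (-1)

theorem final_key (total : List Int) (h : ∀ i : Nat, 0 ≤ total.getD i 0) :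
    ∀ n : Nat,
      (n = 0 ∧ pvFoldA total n = (-1, -1) ∧ pvFoldB total n = -1) ∨
      (∃ m : Nat, m < n ∧ pvFoldB total n = (m : Int) ∧
        pvFoldA total n = (total.getD m 0, (m : Int))) := by
  intro n
  induction n with
  | zero => left; exact ⟨rfl, rfl, rfl⟩
  | succ n ihn =>
    right
    have hA : pvFoldA total (n+1)
        = (if total.getD n 0 > (pvFoldA total n).1 ∨
              (total.getD n 0 = (pvFoldA total n).1 ∧ (n : Int) > (pvFoldA total n).2)
           then (total.getD n 0, (n : Int)) else pvFoldA total n) := by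
      unfold pvFoldA
      rw [List.range_succ, List.foldl_append, List.foldl_cons, List.foldl_nil]
    have hB : pvFoldB total (n+1)
        = (if (pvFoldB total n) < 0 ∨
              total.getD (pvFoldB total n).toNat 0 ≤ total.getD n 0
           then (n : Int) else pvFoldB total n) := by
      unfold pvFoldB
      rw [List.range_succ, List.foldl_append, List.foldl_cons, List.foldl_nil]
    rcases ihn with ⟨hn0, hA0, hB0⟩ | ⟨m, hm, hB0, hA0⟩
    · subst hn0
      refine ⟨0, by omega, ?_, ?_⟩
      · rw [hB, hB0]
        norm_num
      · rw [hA, hA0]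
        rw [if_pos (Or.inl (show total.getD 0 0 > (-1:Int) from by have := h 0; omega))]
    · by_cases hle : total.getD m 0 ≤ total.getD n 0
      · refine ⟨n, by omega, ?_, ?_⟩
        · rw [hB, hB0]
          rw [if_pos (Or.inr (show total.getD ((m:Int)).toNat 0 ≤ total.getD n 0 from by
            rw [Int.toNat_natCast]; exact hle))]
        · rw [hA, hA0]
          rcases lt_or_eq_of_le hle with hlt | heq
          · rw [if_pos (Or.inl (show total.getD n 0 > total.getD m 0 from hlt))]
          · rw [if_pos (Or.inr ⟨show total.getD n 0 = total.getD m 0 from heq.symm,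
              show (n:Int) > (m:Int) from by exact_mod_cast hm⟩)]
      · refine ⟨m, by omega, ?_, ?_⟩
        · rw [hB, hB0]
          have hcond : ¬(((m:Int)) < 0 ∨ total.getD ((m:Int)).toNat 0 ≤ total.getD n 0) := by
            rintro (hlt0 | hle2)
            · omega
            · rw [Int.toNat_natCast] at hle2
              omega
          rw [if_neg hcond]
        · rw [hA, hA0]
          have hcond : ¬(total.getD n 0 > (total.getD m 0, (m:Int)).1 ∨
              (total.getD n 0 = (total.getD m 0, (m:Int)).1 ∧ (n:Int) > (total.getD m 0, (m:Int)).2)) := by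
            rintro (hgt | hconj)
            · have hgt' : total.getD n 0 > total.getD m 0 := hgt
              omega
            · have heq' : total.getD n 0 = total.getD m 0 := hconj.1
              omega
          rw [if_neg hcond]

theorem final_eq (total : List Int) (n : Nat) (h : ∀ i : Nat, 0 ≤ total.getD i 0) :
    finalA total n = finalBscan total n := by
  have hA : finalA total n = (pvFoldA total n).2 := rfl
  have hB : finalBscan total n = pvFoldB total n := rfl
  rcases final_key total h n with ⟨_, hA0, hB0⟩ | ⟨m, _, hB0, hA0⟩
  · rw [hA, hB, hA0, hB0]
  · rw [hA, hB, hA0, hB0]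


-- ===== VERDICT (by name: the statement is the Claim_ definition above) =====
theorem solution_spec : Claim_equal_solution := by
  unfold Claim_equal_solution Spec_solution
  intro cc dl _hdom hpre
  show finalA (dl.foldl (stepA cc cc.length)
      (cc, List.replicate cc.length 0, List.replicate cc.length true, 0)).2.1 cc.length
    = finalBscan (goB cc cc.length dl (List.replicate cc.length true)
        ((List.range cc.length).filterMap
          (fun i => if decide (0 < cc.getD i 0) then some (i, cc.getD i 0) else none))
        (List.replicate cc.length 0)) cc.length
  have hq0 : ((List.range cc.length).filterMap
      (fun i => if decide (0 < cc.getD i 0) then some (i, cc.getD i 0) else none))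
      = availFrom (List.replicate cc.length true) cc cc.length 0 := by
    unfold availFrom rotL
    rw [Nat.sub_zero, List.range_zero, List.append_nil, ← List.range_eq_range']
    apply List.filterMap_congr
    intro j hj
    have hjlt : j < cc.length := List.mem_range.mp hj
    unfold gAv goodC
    have hrep : (List.replicate cc.length true).getD j false = true := by
      simp [List.getD, hjlt]
    rw [hrep]
    simp
  have hpre' : ∀ e ∈ dl, PySem.Str.startswith e "CLOSURE" = true →
      -(cc.length : Int) ≤ closureIdx e ∧ closureIdx e < (cc.length : Int) :=
    fun e he hsw => ⟨(hpre e he hsw).2.2.1, (hpre e he hsw).2.2.2⟩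
  have hcur0 : ((0:Nat) < cc.length ∨ (cc.length = 0 ∧ (0:Nat) = 0)) := by omega
  have htot0 : ∀ x ∈ List.replicate cc.length (0:Int), 0 ≤ x := by
    intro x hx
    rw [List.eq_of_mem_replicate hx]
  obtain ⟨hgo, hnn⟩ := go_sim cc cc.length dl.length dl le_rfl cc (List.replicate cc.length 0)
    (List.replicate cc.length true) 0 _ hpre' rfl List.length_replicate List.length_replicate
    hcur0 hq0 htot0
  rw [hgo]
  exact final_eq _ _ (fun i => pvGetD_nonneg _ i hnn)
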